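-- pv_equiv track=rewrite | github.com/amitduabits/it-management-and-audits | financial-data-manager/src/query_runner.py | _split_sql_file
-- ===== SOURCE A (Python) =====
-- def _split_sql_file(content: str) -> list[tuple[str, str]]:
--     """
--     Split a multi-statement SQL file into (comment, sql) pairs.
--
--     Blocks are separated by semicolons.  The comment is the leading
--     ``-- ...`` line(s) immediately above each statement.
--     """
--     blocks: list[tuple[str, str]] = []
--     current_comment_lines: list[str] = []
--     current_sql_lines: list[str] = []
--
--     for line in content.splitlines():
--         stripped = line.strip()
--         if not stripped:
--             if current_sql_lines:
--                 # blank line inside a statement -- keep it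
--                 current_sql_lines.append(line)
--             continue
--
--         if stripped.startswith("--") and not current_sql_lines:
--             current_comment_lines.append(stripped.lstrip("-").strip())
--         else:
--             current_sql_lines.append(line)
--
--         if stripped.endswith(";"):
--             sql_text = "\n".join(current_sql_lines).strip()
--             comment_text = " | ".join(current_comment_lines) if current_comment_lines else ""
--             if sql_text:
--                 blocks.append((comment_text, sql_text))
--             current_comment_lines = []
--             current_sql_lines = []
--
--     # Handle trailing block without semicolon
--     if current_sql_lines:
--         sql_text = "\n".join(current_sql_lines).strip()
--         comment_text = " | ".join(current_comment_lines) if current_comment_lines else ""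
--         if sql_text:
--             blocks.append((comment_text, sql_text))
--
--     return blocks
-- ===== SOURCE B (Python) =====
-- def _split_sql_file(content: str) -> list[tuple[str, str]]:
--     # Two-pass: cut lines into ';'-terminated groups, then turn each group
--     # into at most one (comment, sql) pair.
--     lines = content.splitlines()
--     groups = []
--     acc = []
--     for line in lines:
--         acc.append(line)
--         if line.strip().endswith(";"):
--             groups.append(acc)
--             acc = []
--     if acc:
--         groups.append(acc)
--
--     blocks = []
--     for group in groups:
--         comments = []
--         sql = []
--         started = False
--         for line in group:
--             if started:
--                 sql.append(line)
--             else: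
--                 stripped = line.strip()
--                 if not stripped:
--                     continue
--                 if stripped.startswith("--"):
--                     comments.append(stripped.lstrip("-").strip())
--                 else:
--                     sql.append(line)
--                     started = True
--         sql_text = "\n".join(sql).strip()
--         if sql_text:
--             blocks.append((" | ".join(comments) if comments else "", sql_text))
--     return blocks
-- ===== Notes on version B (the rewrite author's own statement) =====
-- stated objective: alternative
-- what changed: Replaces A's single stateful pass (comment/sql accumulators flushed in-loop on each statement terminator plus a duplicated trailing flush) by a two-pass decomposition: first cut the lines into semicolon-terminated groups (leftover lines forming a trailing group), then map each group independently to at most one (comment, sql) pair with an explicit started flag.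
import Mathlib
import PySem

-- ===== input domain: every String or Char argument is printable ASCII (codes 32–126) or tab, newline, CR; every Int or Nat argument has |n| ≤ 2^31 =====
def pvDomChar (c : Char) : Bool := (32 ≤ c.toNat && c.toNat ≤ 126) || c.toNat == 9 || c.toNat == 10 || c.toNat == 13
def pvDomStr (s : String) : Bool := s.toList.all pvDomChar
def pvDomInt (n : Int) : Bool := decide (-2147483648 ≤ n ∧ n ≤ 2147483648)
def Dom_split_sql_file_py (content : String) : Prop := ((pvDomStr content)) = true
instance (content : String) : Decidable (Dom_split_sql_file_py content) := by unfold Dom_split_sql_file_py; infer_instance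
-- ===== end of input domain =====

-- B replaces A's single stateful pass by a two-pass decomposition (cut into semicolon-terminated
-- groups, then map each group to at most one pair); same return value, proved equivalent.

-- exact port of Python's str.lstrip("-"): drop leading '-' characters (used by both sources)
def pvLstripDash (cs : List Char) : List Char := cs.dropWhile (· == '-')

-- ===== PORT A =====
-- A's loop state: (blocks, current_comment_lines, current_sql_lines), lines as List Char
def pvStepA (st : List (String × String) × List (List Char) × List (List Char))
    (line : List Char) : List (String × String) × List (List Char) × List (List Char) :=
  let stripped := PySem.Chars.strip line
  if stripped = [] then
    (if st.2.2 ≠ [] then (st.1, st.2.1, st.2.2 ++ [line]) else st)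
  else
    let p : List (List Char) × List (List Char) :=
      if PySem.Chars.startswith stripped ['-', '-'] && st.2.2.isEmpty then
        (st.2.1 ++ [PySem.Chars.strip (pvLstripDash stripped)], st.2.2)
      else (st.2.1, st.2.2 ++ [line])
    if PySem.Chars.endswith stripped [';'] then
      let sql := PySem.Chars.strip (PySem.Chars.join ['\n'] p.2)
      let com := if p.1 = [] then "" else String.ofList (PySem.Chars.join [' ', '|', ' '] p.1)
      ((if sql ≠ [] then st.1 ++ [(com, String.ofList sql)] else st.1), [], [])
    else (st.1, p.1, p.2)

-- A's trailing-block epilogue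
def pvFinishA (st : List (String × String) × List (List Char) × List (List Char)) :
    List (String × String) :=
  if st.2.2 ≠ [] then
    let sql := PySem.Chars.strip (PySem.Chars.join ['\n'] st.2.2)
    let com := if st.2.1 = [] then "" else String.ofList (PySem.Chars.join [' ', '|', ' '] st.2.1)
    (if sql ≠ [] then st.1 ++ [(com, String.ofList sql)] else st.1)
  else st.1

def split_sql_file_py (content : String) : List (String × String) :=
  pvFinishA (((PySem.Str.splitlines content).map String.toList).foldl pvStepA ([], [], []))

-- ===== PORT B =====
-- pass 1: cut the lines into groups, a group ends at a line whose strip() ends with ';'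
def pvCutGroups : List (List Char) → List (List Char) → List (List (List Char))
  | [], acc => if acc = [] then [] else [acc]
  | l :: rest, acc =>
    if PySem.Chars.endswith (PySem.Chars.strip l) [';'] then
      (acc ++ [l]) :: pvCutGroups rest []
    else pvCutGroups rest (acc ++ [l])

-- pass 2 inner loop state: (comments, sql, started)
def pvStepG (st : List (List Char) × List (List Char) × Bool) (line : List Char) :
    List (List Char) × List (List Char) × Bool :=
  if st.2.2 then (st.1, st.2.1 ++ [line], true)
  else
    let stripped := PySem.Chars.strip line
    if stripped = [] then st
    else if PySem.Chars.startswith stripped ['-', '-'] then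
      (st.1 ++ [PySem.Chars.strip (pvLstripDash stripped)], st.2.1, false)
    else (st.1, st.2.1 ++ [line], true)

-- turn a finished group state into zero or one (comment, sql) pairs
def pvFinishG (st : List (List Char) × List (List Char) × Bool) : List (String × String) :=
  let sql := PySem.Chars.strip (PySem.Chars.join ['\n'] st.2.1)
  if sql ≠ [] then
    [((if st.1 = [] then "" else String.ofList (PySem.Chars.join [' ', '|', ' '] st.1)),
      String.ofList sql)]
  else []

def pvProcGroup (g : List (List Char)) : List (String × String) :=
  pvFinishG (g.foldl pvStepG ([], [], false))

def split_sql_file_py_alt (content : String) : List (String × String) :=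
  (pvCutGroups ((PySem.Str.splitlines content).map String.toList) []).flatMap pvProcGroup

-- ===== PRECONDITION & SPEC =====
def Spec_split_sql_file_py (content : String) (out : List (String × String)) : Prop := out = split_sql_file_py_alt content
instance (content : String) (out : List (String × String)) : Decidable (Spec_split_sql_file_py content out) := by unfold Spec_split_sql_file_py; infer_instance

-- ===== CLAIM (what is proved, stated in full; the proofs are below) =====
def Claim_equal_split_sql_file_py : Prop := ∀ (content : String), Dom_split_sql_file_py content → Spec_split_sql_file_py content (split_sql_file_py content)

-- ===== LEMMAS AND PROOFS =====

-- proof-side reference run: process lines from a mid-group state, emitting finished groups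
def pvRun : List (List Char) → (List (List Char) × List (List Char) × Bool) →
    List (String × String)
  | [], st => pvFinishG st
  | l :: rest, st =>
    if PySem.Chars.endswith (PySem.Chars.strip l) [';'] then
      pvFinishG (pvStepG st l) ++ pvRun rest ([], [], false)
    else pvRun rest (pvStepG st l)

-- invariant: in pass-2 state, the sql list is empty iff the started flag is false
def pvInv (st : List (List Char) × List (List Char) × Bool) : Prop :=
  st.2.1 = [] ↔ st.2.2 = false

lemma pvInv_step (st : List (List Char) × List (List Char) × Bool) (l : List Char)
    (h : pvInv st) : pvInv (pvStepG st l) := by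
  unfold pvInv pvStepG at *
  cases hb : st.2.2 <;> simp [hb] at h ⊢ <;> split_ifs <;> simp_all

lemma pvStripNil : PySem.Chars.strip ([] : List Char) = [] := by decide

lemma pvStripJoinNil : PySem.Chars.strip (PySem.Chars.join ['\n'] []) = [] := by decide

lemma pvEndswithNil : PySem.Chars.endswith ([] : List Char) [';'] = false := by decide

lemma pvFinishA_eq (bs : List (String × String)) (st : List (List Char) × List (List Char) × Bool) :
    pvFinishA (bs, st.1, st.2.1) = bs ++ pvFinishG st := by
  unfold pvFinishA pvFinishG
  rcases hs : st.2.1 with _ | ⟨x, xs⟩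
  · simp [pvFinishG, hs, pvStripJoinNil, pvStripNil]
  · simp only [hs, ne_eq, reduceCtorEq, not_false_iff, if_true]
    split_ifs <;> simp_all

lemma pvStepA_eq (bs : List (String × String)) (st : List (List Char) × List (List Char) × Bool)
    (h : pvInv st) (l : List Char) :
    pvStepA (bs, st.1, st.2.1) l =
      (if PySem.Chars.endswith (PySem.Chars.strip l) [';'] then
        (bs ++ pvFinishG (pvStepG st l), [], [])
      else (bs, (pvStepG st l).1, (pvStepG st l).2.1)) := by
  obtain ⟨cs, ss, b⟩ := st
  unfold pvInv at h
  unfold pvStepA pvStepG pvFinishG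
  cases b
  · simp only [iff_true, eq_self_iff_true] at h
    have hss : ss = [] := by simpa using h
    subst hss
    by_cases h1 : PySem.Chars.strip l = []
    · have he : PySem.Chars.endswith (PySem.Chars.strip l) [';'] = false := by
        rw [h1]; exact pvEndswithNil
      simp [h1, he, pvEndswithNil]
    · simp only [h1, if_neg, List.isEmpty_nil, Bool.and_true]
      split_ifs <;> simp_all
  · have hss : ss ≠ [] := by simpa using h
    have hie : ss.isEmpty = false := by simpa [List.isEmpty_iff] using hss
    by_cases h1 : PySem.Chars.strip l = []
    · have he : PySem.Chars.endswith (PySem.Chars.strip l) [';'] = false := by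
        rw [h1]; exact pvEndswithNil
      simp [h1, he, hss, pvEndswithNil]
    · simp only [h1, hie, Bool.and_false, if_false, if_neg]
      split_ifs <;> simp_all

lemma pvRun_A (lines : List (List Char)) :
    ∀ (bs : List (String × String)) (st : List (List Char) × List (List Char) × Bool),
      pvInv st → pvFinishA (lines.foldl pvStepA (bs, st.1, st.2.1)) = bs ++ pvRun lines st := by
  induction lines with
  | nil => intro bs st h; simpa [pvRun] using pvFinishA_eq bs st
  | cons l rest ih =>
    intro bs st h
    simp only [List.foldl_cons, pvRun]
    rw [pvStepA_eq bs st h l]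
    by_cases he : PySem.Chars.endswith (PySem.Chars.strip l) [';'] = true
    · simp only [he, if_true]
      have := ih (bs ++ pvFinishG (pvStepG st l)) ([], [], false) (by simp [pvInv])
      simpa [List.append_assoc] using this
    · simp only [he, if_false]
      have := ih bs (pvStepG st l) (pvInv_step st l h)
      simpa using this

lemma pvRun_B (lines : List (List Char)) :
    ∀ (acc : List (List Char)),
      (pvCutGroups lines acc).flatMap pvProcGroup = pvRun lines (acc.foldl pvStepG ([], [], false)) := by
  induction lines with
  | nil =>
    intro acc
    by_cases ha : acc = []
    · simp [ha, pvCutGroups, pvRun, pvProcGroup, pvFinishG, pvStripJoinNil, pvStripNil]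
    · simp [pvCutGroups, ha, pvRun, pvProcGroup]
  | cons l rest ih =>
    intro acc
    unfold pvCutGroups pvRun
    by_cases he : PySem.Chars.endswith (PySem.Chars.strip l) [';'] = true
    · simp [he, pvProcGroup, ih [], List.foldl_append]
    · simp [he, ih (acc ++ [l]), List.foldl_append]

-- ===== VERDICT (by name: the statement is the Claim_ definition above) =====
theorem split_sql_file_py_spec : Claim_equal_split_sql_file_py := by
  intro content _
  unfold Spec_split_sql_file_py split_sql_file_py split_sql_file_py_alt
  rw [pvRun_B, pvRun_A ((PySem.Str.splitlines content).map String.toList) [] ([], [], false)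
    (by simp [pvInv])]
  rfl
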